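-- pv_equiv track=rewrite | github.com/Paupau18me/EjerciciosPatitoPython2021 | Sesion intrductoria/serie5.py | serie
-- ===== SOURCE A (Python) =====
-- def serie(n):
--     t = 1
--     c = 0
--     for i in range(n):
--         if c < t:
--             c = c + 1
--         else:
--             t = t + 1
--             c = 1
--     return t
-- ===== SOURCE B (Python) =====
-- def serie(n):
--     # binary search for the least positive m whose triangular number reaches n
--     if n <= 0:
--         return 1
--     lo, hi = 1, n
--     while lo < hi:
--         mid = (lo + hi) // 2
--         if mid * (mid + 1) // 2 >= n:
--             hi = mid
--         else:
--             lo = mid + 1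
--     return lo
-- ===== Notes on version B (the rewrite author's own statement) =====
-- stated objective: faster
-- what changed: Replaces the linear step-by-step counting loop with a binary search for the least positive m whose triangular number reaches n.
import Mathlib
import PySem

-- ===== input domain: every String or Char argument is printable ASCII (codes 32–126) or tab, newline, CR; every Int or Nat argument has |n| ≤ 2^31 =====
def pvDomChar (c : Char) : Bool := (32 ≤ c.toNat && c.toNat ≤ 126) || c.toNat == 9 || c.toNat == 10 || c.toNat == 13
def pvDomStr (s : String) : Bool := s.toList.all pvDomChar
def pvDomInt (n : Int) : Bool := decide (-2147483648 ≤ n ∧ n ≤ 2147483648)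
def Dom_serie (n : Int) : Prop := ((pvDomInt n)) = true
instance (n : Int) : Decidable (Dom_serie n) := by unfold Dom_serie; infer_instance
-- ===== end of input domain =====

-- B replaces A's linear step-by-step counting loop with a binary search for the
-- least positive m whose triangular number reaches n (measurably faster).


-- ===== PORT A =====
def serieStep (tc : Int × Int) : Int × Int :=
  if tc.2 < tc.1 then (tc.1, tc.2 + 1) else (tc.1 + 1, 1)

def serie (n : Int) : Int :=
  ((PySem.List.pyRange 0 n 1).foldl (fun tc _ => serieStep tc) (1, 0)).1

-- ===== PORT B =====
-- while lo < hi of Source B; terminates because hi - lo strictly decreases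
def serieLoop (n lo hi : Int) : Int :=
  if h : lo < hi then
    let mid := PySem.Int.floordiv (lo + hi) 2
    if n ≤ PySem.Int.floordiv (mid * (mid + 1)) 2 then
      serieLoop n lo mid
    else
      serieLoop n (mid + 1) hi
  else lo
termination_by (hi - lo).toNat
decreasing_by
  · have := PySem.Int.floordiv_two_mid_bounds (lo := lo) (hi := hi) (le_of_lt h)
    have : PySem.Int.floordiv (lo + hi) 2 < hi :=
      (PySem.Int.floordiv_lt_iff_lt_mul (by omega)).mpr (by omega)
    omega
  · have := PySem.Int.floordiv_two_mid_bounds (lo := lo) (hi := hi) (le_of_lt h)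
    omega

def serie_alt (n : Int) : Int :=
  if n ≤ 0 then 1 else serieLoop n 1 n

-- ===== PRECONDITION & SPEC =====
def Spec_serie (n : Int) (out : Int) : Prop := out = serie_alt n
instance (n : Int) (out : Int) : Decidable (Spec_serie n out) := by unfold Spec_serie; infer_instance

-- ===== CLAIM (what is proved, stated in full; the proofs are below) =====
def Claim_equal_serie : Prop := ∀ (n : Int), Dom_serie n → Spec_serie n (serie n)

-- ===== LEMMAS AND PROOFS =====

-- the characterisation both programs satisfy for n ≥ 1:
-- m is the least positive integer with m*(m+1)/2 ≥ n (stated doubled to avoid division)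
def SerieGood (m n : Int) : Prop := 1 ≤ m ∧ (m - 1) * m < 2 * n ∧ 2 * n ≤ m * (m + 1)

theorem serieGood_unique {a b n : Int} (ha : SerieGood a n) (hb : SerieGood b n) : a = b := by
  obtain ⟨ha1, ha2, ha3⟩ := ha
  obtain ⟨hb1, hb2, hb3⟩ := hb
  by_contra hne
  rcases lt_or_gt_of_ne hne with h | h
  · nlinarith
  · nlinarith

-- A-side: fold of a state-only function is iteration
theorem foldl_const_iterate {α β : Type} (g : α → α) (l : List β) (init : α) :
    l.foldl (fun s _ => g s) init = g^[l.length] init := by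
  induction l generalizing init with
  | nil => rfl
  | cons x xs ih => simp [List.foldl_cons, ih, Function.iterate_succ_apply]

-- invariant of A's loop after k+1 steps
theorem serieStep_invariant (k : Nat) :
    1 ≤ (serieStep^[k + 1] (1, 0)).2 ∧
    (serieStep^[k + 1] (1, 0)).2 ≤ (serieStep^[k + 1] (1, 0)).1 ∧
    ((serieStep^[k + 1] (1, 0)).1 - 1) * (serieStep^[k + 1] (1, 0)).1
      + 2 * (serieStep^[k + 1] (1, 0)).2 = 2 * ((k : Int) + 1) := by
  induction k with
  | zero => simp [serieStep]
  | succ k ih =>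
    rw [Function.iterate_succ_apply' serieStep (k + 1)]
    rcases hE : serieStep^[k + 1] (1, 0) with ⟨t, c⟩
    rw [hE] at ih
    obtain ⟨h1, h2, h3⟩ := ih
    dsimp only at h1 h2 h3
    simp only [serieStep]
    split_ifs with h
    · dsimp only at h ⊢
      push_cast at h3 ⊢
      refine ⟨by omega, by omega, by nlinarith⟩
    · dsimp only at h ⊢
      have hc : c = t := by omega
      push_cast at h3 ⊢
      refine ⟨trivial, by omega, by nlinarith⟩

theorem serie_good {n : Int} (hn : 1 ≤ n) : SerieGood (serie n) n := by
  unfold serie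
  rw [foldl_const_iterate, PySem.List.length_pyRange_one]
  have hk : (n - 0).toNat = (n.toNat - 1) + 1 := by omega
  rw [hk]
  obtain ⟨h1, h2, h3⟩ := serieStep_invariant (n.toNat - 1)
  have hcast : ((n.toNat - 1 : Nat) : Int) + 1 = n := by omega
  rw [hcast] at h3
  exact ⟨by omega, by nlinarith, by nlinarith⟩

-- B-side: the binary-search loop lands on the characterised value
theorem serieLoop_good {n : Int} (lo hi : Int) (h1 : 1 ≤ lo) (h2 : lo ≤ hi)
    (h3 : (lo - 1) * lo < 2 * n) (h4 : 2 * n ≤ hi * (hi + 1)) :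
    SerieGood (serieLoop n lo hi) n := by
  by_cases hlt : lo < hi
  · rw [serieLoop, dif_pos hlt]
    have hb := PySem.Int.floordiv_two_mid_bounds (lo := lo) (hi := hi) (le_of_lt hlt)
    
    set mid := PySem.Int.floordiv (lo + hi) 2 with hmid
    have hmlt : mid < hi :=
      (PySem.Int.floordiv_lt_iff_lt_mul (by omega)).mpr (by omega)
    have hcond : (n ≤ PySem.Int.floordiv (mid * (mid + 1)) 2) ↔ n * 2 ≤ mid * (mid + 1) :=
      PySem.Int.le_floordiv_iff_mul_le (by omega)
    by_cases hc : n ≤ PySem.Int.floordiv (mid * (mid + 1)) 2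
    · rw [if_pos hc]
      exact serieLoop_good lo mid h1 (by omega) h3 (by nlinarith [hcond.mp hc])
    · rw [if_neg hc]
      have : ¬ n * 2 ≤ mid * (mid + 1) := fun h => hc (hcond.mpr h)
      exact serieLoop_good (mid + 1) hi (by omega) (by omega) (by nlinarith) h4
  · rw [serieLoop, dif_neg hlt]
    have : lo = hi := by omega
    exact ⟨h1, h3, by rw [this]; exact h4⟩
termination_by (hi - lo).toNat
decreasing_by
  · omega
  · omega

theorem serie_alt_good {n : Int} (hn : 1 ≤ n) : SerieGood (serie_alt n) n := by
  unfold serie_alt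
  rw [if_neg (by omega)]
  exact serieLoop_good 1 n (le_refl 1) hn (by omega) (by nlinarith)

-- ===== VERDICT (by name: the statement is the Claim_ definition above) =====
theorem serie_spec : Claim_equal_serie := by
  intro n _
  unfold Spec_serie
  by_cases h : n ≤ 0
  · unfold serie serie_alt
    rw [PySem.List.pyRange_one_eq_nil (by omega), if_pos h]
    rfl
  · exact serieGood_unique (serie_good (by omega)) (serie_alt_good (by omega))
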